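-- pv_equiv track=rewrite | github.com/Perevalov/component-composition-4-qa | notebooks/evaluation.py | prune_reachable
-- ===== SOURCE A (Python) =====
-- def prune_reachable(combinations):
--     comb_size_dict = dict()
--     for comb in combinations:
--         size = len(str(comb).split(" --> "))
--         comb_size_dict[str(comb)] = size
--
--     _min = min(list(comb_size_dict.values()))
--
--     filtered_dict = {key: value for key, value in comb_size_dict.items() if value == _min}
--     return list(filtered_dict.keys())
-- ===== SOURCE B (Python) =====
-- def prune_reachable(combinations):
--     buckets = {}
--     seen = set()
--     for comb in combinations:
--         s = str(comb)
--         if s in seen: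
--             continue
--         seen.add(s)
--         size = len(s.split(" --> "))
--         buckets.setdefault(size, []).append(s)
--     return buckets[min(buckets)]
-- ===== Notes on version B (the rewrite author's own statement) =====
-- stated objective: alternative
-- what changed: B replaces A's two dict passes (map every comb to its size, then re-scan the dict for the min) with one pass that groups unique combinations into size-indexed buckets via a seen-set, then returns the bucket of the smallest size key.
import Mathlib
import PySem

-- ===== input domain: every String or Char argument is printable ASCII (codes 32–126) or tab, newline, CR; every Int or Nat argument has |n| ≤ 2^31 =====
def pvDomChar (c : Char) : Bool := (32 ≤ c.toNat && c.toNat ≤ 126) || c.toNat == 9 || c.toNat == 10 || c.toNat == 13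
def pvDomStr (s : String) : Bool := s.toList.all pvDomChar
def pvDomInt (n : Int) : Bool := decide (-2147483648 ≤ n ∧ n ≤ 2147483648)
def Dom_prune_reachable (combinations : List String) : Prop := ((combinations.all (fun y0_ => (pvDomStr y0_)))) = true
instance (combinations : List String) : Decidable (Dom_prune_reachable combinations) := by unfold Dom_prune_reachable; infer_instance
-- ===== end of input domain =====

-- B groups unique combinations by size into buckets in one pass and returns the minimal bucket (alternative decomposition; same return value).

-- size of a combination string: len(s.split(" --> "))
def pvSize (s : String) : Int := ((PySem.Chars.splitOn s.toList " --> ".toList).length : Int)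

-- ===== PORT A =====
-- the loop building comb_size_dict
def pvCombSizeDict (combinations : List String) : PySem.Dict String Int :=
  combinations.foldl (fun d comb => d.insert comb (pvSize comb)) PySem.Dict.empty

def prune_reachable (combinations : List String) : List String :=
  match PySem.List.min? (pvCombSizeDict combinations).values (fun v => v) with
  | none => []   -- Python raises ValueError here (empty input); excluded by Pre_
  | some m => (((pvCombSizeDict combinations).items.filter (fun p => p.2 == m)).map (·.1))

-- ===== PORT B =====
-- the loop building (buckets, seen)
def pvBuckets (combinations : List String) : PySem.Dict Int (List String) × PySem.Set String :=
  combinations.foldl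
    (fun st comb =>
      if PySem.Set.contains st.2 comb then st
      else (st.1.modify (pvSize comb) [] (· ++ [comb]), PySem.Set.add st.2 comb))
    (PySem.Dict.empty, PySem.Set.empty)

def prune_reachable_alt (combinations : List String) : List String :=
  match PySem.List.min? (pvBuckets combinations).1.keys (fun k => k) with
  | none => []   -- Python raises ValueError here (empty input); excluded by Pre_
  | some m => (pvBuckets combinations).1.getD m []

-- ===== PRECONDITION & SPEC =====
-- Both A and B raise ValueError (min of an empty collection) on the empty list; Pre_ excludes exactly that input.
def Pre_prune_reachable (combinations : List String) : Prop := combinations ≠ []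
instance (combinations : List String) : Decidable (Pre_prune_reachable combinations) := by unfold Pre_prune_reachable; infer_instance
def pvWitness_prune_reachable : List String := ["a --> b", "c"]

def Spec_prune_reachable (combinations : List String) (out : List String) : Prop := out = prune_reachable_alt combinations
instance (combinations : List String) (out : List String) : Decidable (Spec_prune_reachable combinations out) := by unfold Spec_prune_reachable; infer_instance

-- ===== CLAIM (what is proved, stated in full; the proofs are below) =====
def Claim_equal_prune_reachable : Prop := ∀ (combinations : List String), Dom_prune_reachable combinations → Pre_prune_reachable combinations → Spec_prune_reachable combinations (prune_reachable combinations)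

-- ===== LEMMAS AND PROOFS =====

-- first occurrences of l that are not already in the seen-set s, in order
def pvNew (s : PySem.Set String) : List String → List String
  | [] => []
  | x :: t => if PySem.Set.contains s x then pvNew s t else x :: pvNew (PySem.Set.add s x) t

-- B's loop, characterised: buckets is the modify-fold over the fresh elements, seen is updated
theorem pvB_state (l : List String) (b : PySem.Dict Int (List String)) (s : PySem.Set String) :
    l.foldl
      (fun st comb =>
        if PySem.Set.contains st.2 comb then st
        else (st.1.modify (pvSize comb) [] (· ++ [comb]), PySem.Set.add st.2 comb))
      (b, s)
    = ((pvNew s l).foldl (fun d x => d.modify (pvSize x) [] (· ++ [x])) b, PySem.Set.update s l) := by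
  induction l generalizing b s with
  | nil => simp [pvNew, PySem.Set.update]
  | cons x t ih =>
    by_cases h : PySem.Set.contains s x
    · have hmem : x ∈ s := by simpa [PySem.Set.contains] using h
      simp only [List.foldl_cons, pvNew, h, if_pos]
      rw [ih]
      have hadd : PySem.Set.add s x = s := by simp [PySem.Set.add, PySem.Set.contains, hmem]
      simp [PySem.Set.update, List.foldl_cons, hadd]
    · simp only [List.foldl_cons, pvNew, h, if_false, Bool.false_eq_true]
      rw [ih]
      simp [PySem.Set.update, List.foldl_cons]

-- A's dict, characterised: items are the fresh elements paired with their sizes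
theorem pvA_items (l : List String) (d : PySem.Dict String Int) (S : PySem.Set String)
    (hd : d.items = S.map (fun k => (k, pvSize k))) :
    (l.foldl (fun d comb => d.insert comb (pvSize comb)) d).items
      = (S ++ pvNew S l).map (fun k => (k, pvSize k)) := by
  induction l generalizing d S with
  | nil => simp [pvNew, hd]
  | cons x t ih =>
    have hcont : d.contains x = PySem.Set.contains S x := by
      simp only [PySem.Dict.contains, hd, List.any_map, PySem.Set.contains]
      simp [Function.comp_def, List.any_beq']
    by_cases h : PySem.Set.contains S x
    · simp only [List.foldl_cons, pvNew, h, if_pos]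
      have hstep : (d.insert x (pvSize x)).items = S.map (fun k => (k, pvSize k)) := by
        rw [PySem.Dict.items_insert_of_contains d (pvSize x) (by rw [hcont]; exact h), hd, List.map_map]
        apply List.map_congr_left
        intro k _
        by_cases hk : k = x <;> simp [hk]
      exact ih _ _ hstep
    · have hmem : x ∉ S := by simpa [PySem.Set.contains] using h
      simp only [List.foldl_cons, pvNew, h, if_false, Bool.false_eq_true]
      have hadd : PySem.Set.add S x = S ++ [x] := by
        simp [PySem.Set.add, PySem.Set.contains, hmem]
      have hstep : (d.insert x (pvSize x)).items = (PySem.Set.add S x).map (fun k => (k, pvSize k)) := by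
        rw [PySem.Dict.items_insert_of_not_contains d (pvSize x)
          (by rw [hcont]; exact Bool.of_not_eq_true h), hd, hadd]
        simp
      rw [ih _ _ hstep, hadd]
      simp

-- min over the set of values equals min over the list of values
theorem pv_min_ofList (v : List Int) :
    PySem.List.min? (PySem.Set.ofList v) (fun k => k) = PySem.List.min? v (fun k => k) := by
  cases hv : v with
  | nil => simp [PySem.Set.ofList, PySem.Set.empty]
  | cons x t =>
    have hne : PySem.Set.ofList (x :: t) ≠ [] := by
      intro h
      have hx : x ∈ PySem.Set.ofList (x :: t) := by
        rw [PySem.Set.mem_ofList]; exact List.mem_cons_self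
      simp [h] at hx
    cases hm1 : PySem.List.min? (PySem.Set.ofList (x :: t)) (fun k : Int => k) with
    | none => exact absurd (PySem.List.min?_eq_none_iff _ _ |>.mp hm1) hne
    | some m1 =>
      cases hm2 : PySem.List.min? (x :: t) (fun k : Int => k) with
      | none => exact absurd (PySem.List.min?_eq_none_iff _ _ |>.mp hm2) (List.cons_ne_nil x t)
      | some m2 =>
        have h1mem : m1 ∈ (x :: t) := (PySem.Set.mem_ofList _ _).mp (PySem.List.min?_mem hm1)
        have h2mem : m2 ∈ PySem.Set.ofList (x :: t) := by
          rw [PySem.Set.mem_ofList]; exact PySem.List.min?_mem hm2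
        have h12 := PySem.List.min?_isMin hm1 m2 h2mem
        have h21 := PySem.List.min?_isMin hm2 m1 h1mem
        exact congrArg some (le_antisymm h12 h21)

theorem pvNew_ne_nil (x : String) (t : List String) : pvNew PySem.Set.empty (x :: t) ≠ [] := by
  simp [pvNew, PySem.Set.contains, PySem.Set.empty]

-- ===== VERDICT (by name: the statement is the Claim_ definition above) =====
theorem prune_reachable_spec : Claim_equal_prune_reachable := by
  intro combinations _ hpre
  unfold Spec_prune_reachable prune_reachable prune_reachable_alt
  have hA := pvA_items combinations PySem.Dict.empty PySem.Set.empty (by simp [PySem.Set.empty, PySem.Dict.empty])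
  set L := pvNew PySem.Set.empty combinations with hL
  have hLne : L ≠ [] := by
    cases combinations with
    | nil => exact absurd rfl hpre
    | cons x t => exact pvNew_ne_nil x t
  have hB : pvBuckets combinations
      = (L.foldl (fun d x => d.modify (pvSize x) [] (· ++ [x])) PySem.Dict.empty,
         PySem.Set.update PySem.Set.empty combinations) := by
    unfold pvBuckets
    rw [pvB_state]
  have hitems : (pvCombSizeDict combinations).items = L.map (fun k => (k, pvSize k)) := by
    unfold pvCombSizeDict
    rw [hA]
    simp [PySem.Set.empty]
  have hvals : (pvCombSizeDict combinations).values = L.map pvSize := by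
    simp only [PySem.Dict.values, hitems]
    simp [List.map_map, Function.comp_def]
  have hkeys : (pvBuckets combinations).1.keys = PySem.Set.ofList (L.map pvSize) := by
    rw [hB]
    rw [PySem.Dict.keys_foldl_modify_key L pvSize [] (fun _ x => (· ++ [x]))]
    simp [PySem.Dict.empty, PySem.Dict.keys, PySem.Set.ofList, PySem.Set.update]
  rw [hvals, hkeys, pv_min_ofList]
  cases hmin : PySem.List.min? (L.map pvSize) (fun k => k) with
  | none =>
    exact absurd (List.map_eq_nil_iff.mp ((PySem.List.min?_eq_none_iff _ _).mp hmin)) hLne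
  | some m =>
    have hfold : L.foldl (fun d x => d.modify (pvSize x) [] (· ++ [x])) PySem.Dict.empty
        = (L.map (fun x => (pvSize x, x))).foldl
            (fun d p => d.modify p.1 [] (· ++ [p.2])) PySem.Dict.empty := by
      rw [List.foldl_map]
    simp only [hitems, hB, hfold, PySem.Dict.getD_foldl_modify_append]
    simp [PySem.Dict.getD_empty, List.filter_map, Function.comp_def, List.map_map]
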